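-- pv_equiv track=rewrite | github.com/yuhaoleeyh/cs206-project | ml/utils/pwd_utils.py | get_job_vector
-- ===== SOURCE A (Python) =====
-- viz_wheel = ['Flyer Distributer', 'Mailman', 'Delivery Staff', 'Delivery Personnel','Truck Driver']
--
-- hear_autism_strangers = ['Cashier', 'Waiter', 'Call Center Worker', 'Customer Service', 'Bank Teller', 'Frontline Sales']
--
-- hands = ['Factory/General Worker', 'Food Processing Worker', 'Packing Worker', 'Manufacturing Worker']
--
-- computer = ['Data Entry', 'Data Processing Clerk', 'Data Analyst', 'Business Analyst', 'Data Engineer', 'IT Help Desk', 'Web Developer']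
--
-- creativity = ['Advertising Copywriter', 'Marketing Copywriter', 'Advertising Staff', 'Marketing Staff']
--
-- for_everyone = ['Admin Assistant', 'HR Staff', 'Research Assistant', 'Personal Assistant']
--
-- def get_full_list_of_jobs():
--     return viz_wheel + hear_autism_strangers + hands + computer + creativity + for_everyone
--
-- def get_job_vector(question_num):
--     list_of_jobs = get_full_list_of_jobs()
--     jobs_to_exclude_list = [viz_wheel, hear_autism_strangers, viz_wheel, hear_autism_strangers,
--                             hands, hear_autism_strangers, computer, creativity]
--     jobs_to_exclude = jobs_to_exclude_list[question_num]
--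
--     job_vector = [0] * len(list_of_jobs)
--     for job in jobs_to_exclude:
--         job_index = list_of_jobs.index(job)
--         job_vector[job_index] = -1
--
--     return job_vector
-- ===== SOURCE B (Python) =====
-- viz_wheel = ['Flyer Distributer', 'Mailman', 'Delivery Staff', 'Delivery Personnel','Truck Driver']
-- hear_autism_strangers = ['Cashier', 'Waiter', 'Call Center Worker', 'Customer Service', 'Bank Teller', 'Frontline Sales']
-- hands = ['Factory/General Worker', 'Food Processing Worker', 'Packing Worker', 'Manufacturing Worker']
-- computer = ['Data Entry', 'Data Processing Clerk', 'Data Analyst', 'Business Analyst', 'Data Engineer', 'IT Help Desk', 'Web Developer']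
-- creativity = ['Advertising Copywriter', 'Marketing Copywriter', 'Advertising Staff', 'Marketing Staff']
-- for_everyone = ['Admin Assistant', 'HR Staff', 'Research Assistant', 'Personal Assistant']
--
-- _CATEGORIES = [viz_wheel, hear_autism_strangers, hands, computer, creativity, for_everyone]
-- _QUESTION_TO_CATEGORY = [0, 1, 0, 1, 2, 1, 3, 4]
--
-- def get_job_vector(question_num):
--     # The full job list is the concatenation of the six disjoint categories, and
--     # each question excludes exactly one whole category, so the vector is a block
--     # of -1 at that category's offset surrounded by zeros: no scanning at all.
--     cat = _QUESTION_TO_CATEGORY[question_num]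
--     off = sum(len(c) for c in _CATEGORIES[:cat])
--     n = len(_CATEGORIES[cat])
--     total = sum(len(c) for c in _CATEGORIES)
--     return [0] * off + [-1] * n + [0] * (total - off - n)
-- ===== Notes on version B (the rewrite author's own statement) =====
-- stated objective: alternative
-- what changed: B replaces A's mutate-a-zero-vector-via-list.index loop by pure offset arithmetic: since the full list is the concatenation of disjoint categories and each question excludes one whole category, B builds the vector as zeros ++ block of -1 ++ zeros from the category's offset and length, never comparing job strings at all.
import Mathlib
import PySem

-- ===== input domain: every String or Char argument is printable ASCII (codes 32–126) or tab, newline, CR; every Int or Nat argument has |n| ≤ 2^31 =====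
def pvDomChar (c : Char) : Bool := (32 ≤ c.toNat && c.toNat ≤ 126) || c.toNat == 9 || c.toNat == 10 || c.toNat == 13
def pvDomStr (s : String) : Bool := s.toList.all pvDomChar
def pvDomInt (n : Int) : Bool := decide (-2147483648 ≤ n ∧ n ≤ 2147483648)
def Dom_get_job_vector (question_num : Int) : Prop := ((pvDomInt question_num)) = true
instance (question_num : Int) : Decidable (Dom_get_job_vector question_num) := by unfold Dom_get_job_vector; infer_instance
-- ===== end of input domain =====

-- B replaces A's zero-vector-mutation via list.index scans by pure offset arithmetic
-- (zeros ++ -1-block ++ zeros from the excluded category's offset and length); alternative.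

-- ===== PORT A =====
def viz_wheel : List String := ["Flyer Distributer", "Mailman", "Delivery Staff", "Delivery Personnel", "Truck Driver"]
def hear_autism_strangers : List String := ["Cashier", "Waiter", "Call Center Worker", "Customer Service", "Bank Teller", "Frontline Sales"]
def hands : List String := ["Factory/General Worker", "Food Processing Worker", "Packing Worker", "Manufacturing Worker"]
def computer : List String := ["Data Entry", "Data Processing Clerk", "Data Analyst", "Business Analyst", "Data Engineer", "IT Help Desk", "Web Developer"]
def creativity : List String := ["Advertising Copywriter", "Marketing Copywriter", "Advertising Staff", "Marketing Staff"]
def for_everyone : List String := ["Admin Assistant", "HR Staff", "Research Assistant", "Personal Assistant"]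

def get_full_list_of_jobs : List String :=
  viz_wheel ++ hear_autism_strangers ++ hands ++ computer ++ creativity ++ for_everyone

def jobs_to_exclude_list : List (List String) :=
  [viz_wheel, hear_autism_strangers, viz_wheel, hear_autism_strangers,
   hands, hear_autism_strangers, computer, creativity]

def get_job_vector (question_num : Int) : List Int :=
  let list_of_jobs := get_full_list_of_jobs
  match PySem.List.pyGet? jobs_to_exclude_list question_num with
  | none => []  -- IndexError in Python; excluded by Pre_
  | some jobs_to_exclude =>
    jobs_to_exclude.foldl (fun vec job =>
      match PySem.List.index? list_of_jobs job with
      | some i => vec.set i (-1)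
      | none => vec)  -- ValueError in Python; never happens (every job is in the full list)
      (List.replicate list_of_jobs.length 0)

-- ===== PORT B =====
def pvCategories : List (List String) :=
  [viz_wheel, hear_autism_strangers, hands, computer, creativity, for_everyone]

def pvQuestionToCategory : List Nat := [0, 1, 0, 1, 2, 1, 3, 4]

def get_job_vector_alt (question_num : Int) : List Int :=
  match PySem.List.pyGet? pvQuestionToCategory question_num with
  | none => []  -- IndexError in Python; excluded by Pre_
  | some cat =>
    let off := ((pvCategories.take cat).map List.length).sum
    let n := (pvCategories.getD cat []).length
    let total := (pvCategories.map List.length).sum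
    List.replicate off 0 ++ List.replicate n (-1) ++ List.replicate (total - off - n) 0

-- ===== PRECONDITION & SPEC =====
-- Pre_ excludes exactly the inputs on which A raises IndexError (question_num outside [-8, 7]).
def Pre_get_job_vector (question_num : Int) : Prop := PySem.Raise.InRange jobs_to_exclude_list.length question_num
instance (question_num : Int) : Decidable (Pre_get_job_vector question_num) := by unfold Pre_get_job_vector; infer_instance
def pvWitness_get_job_vector : Int := (3)

def Spec_get_job_vector (question_num : Int) (out : List Int) : Prop := out = get_job_vector_alt question_num
instance (question_num : Int) (out : List Int) : Decidable (Spec_get_job_vector question_num out) := by unfold Spec_get_job_vector; infer_instance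

-- ===== CLAIM =====
def Claim_equal_get_job_vector : Prop := ∀ (question_num : Int), Dom_get_job_vector question_num → Pre_get_job_vector question_num → Spec_get_job_vector question_num (get_job_vector question_num)

-- ===== LEMMAS AND PROOFS =====

-- ===== VERDICT =====
theorem get_job_vector_spec : Claim_equal_get_job_vector := by
  intro q _ hp
  unfold Spec_get_job_vector
  simp only [Pre_get_job_vector, PySem.Raise.InRange, jobs_to_exclude_list] at hp
  obtain ⟨h1, h2⟩ := hp
  simp only [List.length] at h1 h2
  interval_cases q <;> decide
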